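-- pv_equiv track=rewrite | github.com/bread-and-pepper/busylissy | blfile/functions.py | _get_subdir_list
-- ===== SOURCE A (Python) =====
-- def _get_subdir_list(dir_name):
--     """
--     Get a list of subdirectories.
--     """
--
--     subdir_list = []
--     if dir_name:
--         dirlink = ''
--         dir_items = dir_name.split('/')
--         dir_items.pop()
--         for dirname in dir_items:
--             dirlink = dirlink + dirname + '/'
--             subdir_list.append([dirname,dirlink])
--     return subdir_list
-- ===== SOURCE B (Python) =====
-- def _get_subdir_list(dir_name):
--     """
--     Get a list of subdirectories.
--     """
--     segments = dir_name.split('/')[:-1]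
--     return [[seg, '/'.join(segments[:i + 1]) + '/']
--             for i, seg in enumerate(segments)]
-- ===== Notes on version B (the rewrite author's own statement) =====
-- stated objective: simpler
-- what changed: Replaces the running link-prefix accumulator threaded through an explicit append loop with a single comprehension that recomputes each cumulative path directly by joining the segment prefix.
import Mathlib
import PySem

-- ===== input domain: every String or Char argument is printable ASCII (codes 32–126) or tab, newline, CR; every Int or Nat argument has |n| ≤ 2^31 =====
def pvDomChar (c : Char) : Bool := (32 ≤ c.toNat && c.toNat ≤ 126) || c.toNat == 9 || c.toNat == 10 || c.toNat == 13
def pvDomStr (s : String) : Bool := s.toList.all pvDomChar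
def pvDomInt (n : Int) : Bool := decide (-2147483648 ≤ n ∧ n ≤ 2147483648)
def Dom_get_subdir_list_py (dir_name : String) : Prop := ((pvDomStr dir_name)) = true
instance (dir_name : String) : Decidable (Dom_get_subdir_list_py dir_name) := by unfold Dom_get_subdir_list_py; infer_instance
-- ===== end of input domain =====

-- B drops A's running link-prefix accumulator: each cumulative path is recomputed
-- directly by joining the segment prefix, inside one comprehension (objective: simpler).


-- ===== PORT A =====
-- dir_name.split('/') with the nonempty literal separator '/': split? is always `some`,
-- so `.getD []` is exact here.  dir_items.pop() drops the last element = List.dropLast.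
def get_subdir_list_py (dir_name : String) : List (List String) :=
  if dir_name ≠ "" then
    let dir_items := ((PySem.Str.split? dir_name "/").getD []).dropLast
    (dir_items.foldl
      (fun (st : String × List (List String)) dirname =>
        (st.1 ++ dirname ++ "/", st.2 ++ [[dirname, st.1 ++ dirname ++ "/"]]))
      ("", [])).2
  else []

-- ===== PORT B =====
-- segments = dir_name.split('/')[:-1]; [[seg, '/'.join(segments[:i+1]) + '/'] for i, seg in enumerate(segments)]
def get_subdir_list_py_alt (dir_name : String) : List (List String) :=
  let segments := PySem.List.slice ((PySem.Str.split? dir_name "/").getD []) none (some (-1))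
  (PySem.List.enumerate segments).map (fun p =>
    [p.2, PySem.Str.join "/" (PySem.List.slice segments none (some (p.1 + 1))) ++ "/"])

-- ===== PRECONDITION & SPEC =====
def Spec_get_subdir_list_py (dir_name : String) (out : List (List String)) : Prop := out = get_subdir_list_py_alt dir_name
instance (dir_name : String) (out : List (List String)) : Decidable (Spec_get_subdir_list_py dir_name out) := by unfold Spec_get_subdir_list_py; infer_instance

-- ===== CLAIM (what is proved, stated in full; the proofs are below) =====
def Claim_equal_get_subdir_list_py : Prop := ∀ (dir_name : String), Dom_get_subdir_list_py dir_name → Spec_get_subdir_list_py dir_name (get_subdir_list_py dir_name)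

-- ===== LEMMAS AND PROOFS =====

-- A's loop body, and the accumulated link prefix starting from the empty string.
def pvStep (st : String × List (List String)) (d : String) : String × List (List String) :=
  (st.1 ++ d ++ "/", st.2 ++ [[d, st.1 ++ d ++ "/"]])

def pvJ (l : List String) : String := l.foldl (fun a d => a ++ d ++ "/") ""

theorem pvJ_from (l : List String) : ∀ (a : String),
    l.foldl (fun a d => a ++ d ++ "/") a = a ++ pvJ l := by
  induction l with
  | nil => intro a; simp [pvJ]
  | cons x t ih =>
      intro a
      have hx : pvJ (x :: t) = ("" ++ x ++ "/") ++ pvJ t := by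
        show List.foldl _ "" (x :: t) = _
        rw [List.foldl_cons]; exact ih _
      rw [List.foldl_cons, ih, hx]
      simp [String.append_assoc]

theorem pvJ_cons (x : String) (l : List String) : pvJ (x :: l) = x ++ "/" ++ pvJ l := by
  show List.foldl _ "" (x :: l) = _
  rw [List.foldl_cons, pvJ_from]
  simp [String.append_assoc]

theorem pvLoop_snd (l : List String) : ∀ (a : String) (out : List (List String)),
    (l.foldl pvStep (a, out)).2
      = out ++ (PySem.List.enumerate l).map
          (fun p => [p.2, a ++ pvJ (l.take (p.1.toNat + 1))]) := by
  induction l with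
  | nil => intro a out; simp [PySem.List.enumerate_nil]
  | cons x t ih =>
      intro a out
      simp only [List.foldl_cons, pvStep, ih]
      rw [PySem.List.enumerate_cons, List.map_cons, List.append_assoc]
      congr 1
      rw [List.singleton_append]
      congr 1
      · simp only [Int.toNat_zero, List.take_succ_cons, List.take_zero]
        simp [pvJ, String.append_assoc]
      · apply List.ext_getElem
        · simp [PySem.List.length_enumerate]
        · intro k h1 h2
          have hk : k < t.length := by
            simpa [PySem.List.length_enumerate] using h1
          simp only [List.getElem_map, PySem.List.getElem_enumerate]
          have h01 : ((0 : Int) + 1 + (k : Int)).toNat = k + 1 := by omega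
          have h0 : ((0 : Int) + (k : Int)).toNat = k := by omega
          simp only [h01, h0, List.take_succ_cons]
          rw [pvJ_cons]
          simp [String.append_assoc]

-- '/'.join(l) + '/' equals the left-fold prefix for nonempty l
theorem pvJoin_eq (l : List String) : ∀ (x : String),
    PySem.Str.join "/" (x :: l) ++ "/" = pvJ (x :: l) := by
  induction l with
  | nil =>
      intro x
      rw [pvJ_cons]
      rw [← String.toList_inj]
      simp only [String.toList_append, PySem.Str.toList_join, List.map_cons, List.map_nil,
        PySem.Chars.join_singleton]
      simp [pvJ]
  | cons y t ih =>
      intro x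
      have hx : PySem.Str.join "/" (x :: y :: t) = x ++ "/" ++ PySem.Str.join "/" (y :: t) := by
        rw [← String.toList_inj]
        simp only [String.toList_append, PySem.Str.toList_join, List.map_cons,
          PySem.Chars.join_cons_cons]
      rw [hx, String.append_assoc, String.append_assoc, ih y]
      simp [pvJ_cons, String.append_assoc]

theorem pvMap_eq (segs : List String) :
    (PySem.List.enumerate segs).map
        (fun p => [p.2, PySem.Str.join "/" (PySem.List.slice segs none (some (p.1 + 1))) ++ "/"])
      = (PySem.List.enumerate segs).map
          (fun p => [p.2, "" ++ pvJ (segs.take (p.1.toNat + 1))]) := by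
  apply List.ext_getElem
  · simp
  · intro k h1 h2
    have hk : k < segs.length := by simpa [PySem.List.length_enumerate] using h1
    simp only [List.getElem_map, PySem.List.getElem_enumerate]
    have hc : (0 : Int) + (k : Int) + 1 = ((k + 1 : Nat) : Int) := by push_cast; ring
    simp only [hc, PySem.List.slice_to_natCast]
    have h0 : ((0 : Int) + (k : Int)).toNat = k := by omega
    rw [h0]
    have hne : segs.take (k + 1) ≠ [] := by
      intro hnil
      rw [List.take_eq_nil_iff] at hnil
      rcases hnil with h' | h'
      · omega
      · subst h'; simp at hk
    cases hseg : segs.take (k + 1) with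
    | nil => exact absurd hseg hne
    | cons x l => rw [pvJoin_eq]; simp

-- ===== VERDICT (by name: the statement is the Claim_ definition above) =====
theorem get_subdir_list_py_spec : Claim_equal_get_subdir_list_py := by
  intro dir_name _
  unfold Spec_get_subdir_list_py get_subdir_list_py get_subdir_list_py_alt
  rw [PySem.List.slice_to_neg_one]
  by_cases h : dir_name = ""
  · subst h
    have h0 : (PySem.Str.split? "" "/").getD [] = [""] := by decide
    rw [h0]
    simp [PySem.List.enumerate_nil]
  · simp only [h, ne_eq, not_false_eq_true, if_pos]
    set segs := ((PySem.Str.split? dir_name "/").getD []).dropLast with hsegs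
    show (segs.foldl _ ("", [])).2 = _
    have hfold : (fun (st : String × List (List String)) dirname =>
        (st.1 ++ dirname ++ "/", st.2 ++ [[dirname, st.1 ++ dirname ++ "/"]])) = pvStep := rfl
    rw [hfold, pvLoop_snd segs "" [], List.nil_append, pvMap_eq]
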